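-- pv_equiv track=rewrite | github.com/raulhigueras/LolaVA | modules/mtranslator.py | extraer_palabra_de_frase
-- ===== SOURCE A (Python) =====
-- def extraer_palabra_de_frase(frase):
-- 	traducir = False
-- 	palabra = []
-- 	frase = frase.split(" ")
-- 	for p in frase:
-- 		if traducir == True:
-- 			palabra.append(p)
-- 		if p == "traducir" or p == "traduce":
-- 			traducir = True
-- 	return ' '.join(palabra)
-- ===== SOURCE B (Python) =====
-- def extraer_palabra_de_frase(frase):
--     words = frase.split(" ")
--     for i, w in enumerate(words):
--         if w == "traducir" or w == "traduce":
--             return ' '.join(words[i+1:])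
--     return ''
-- ===== Notes on version B (the rewrite author's own statement) =====
-- stated objective: simpler
-- what changed: Replaces the boolean-flag-plus-accumulator scan with finding the first trigger word and slicing/joining the tail of the word list.
import Mathlib
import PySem

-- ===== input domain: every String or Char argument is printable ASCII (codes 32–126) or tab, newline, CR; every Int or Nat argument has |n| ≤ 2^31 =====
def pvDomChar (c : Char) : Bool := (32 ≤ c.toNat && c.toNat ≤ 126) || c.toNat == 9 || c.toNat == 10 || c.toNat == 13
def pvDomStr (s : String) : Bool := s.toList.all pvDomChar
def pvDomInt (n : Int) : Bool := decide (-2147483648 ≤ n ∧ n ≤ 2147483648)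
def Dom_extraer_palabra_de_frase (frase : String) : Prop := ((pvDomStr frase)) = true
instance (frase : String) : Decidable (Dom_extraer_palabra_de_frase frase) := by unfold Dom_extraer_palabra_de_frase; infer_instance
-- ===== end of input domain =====

-- B replaces A's boolean-flag accumulator with find-first-trigger-then-join-the-tail (simpler decomposition, same cost).
-- ===== PORT A =====
-- Loop state: (traducir flag, accumulated words); 'palabra.append' and the trigger test in A's order.
def pvAStep (s : Bool × List String) (p : String) : Bool × List String :=
  let pal := if s.1 = true then s.2 ++ [p] else s.2
  let tr := if p = "traducir" ∨ p = "traduce" then true else s.1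
  (tr, pal)

def extraer_palabra_de_frase (frase : String) : String :=
  let fraseWords := ((PySem.Str.split? frase " ").getD [])
  let st := fraseWords.foldl pvAStep (false, [])
  PySem.Str.join " " st.2

-- ===== PORT B =====
-- B: scan the word list for the first trigger word, then join the tail after it; '' if none.
def pvFindTail : List String → String
  | [] => ""
  | w :: rest => if w = "traducir" || w = "traduce" then PySem.Str.join " " rest else pvFindTail rest

def extraer_palabra_de_frase_alt (frase : String) : String :=
  pvFindTail (((PySem.Str.split? frase " ").getD []))

-- ===== PRECONDITION & SPEC =====
def Spec_extraer_palabra_de_frase (frase : String) (out : String) : Prop := out = extraer_palabra_de_frase_alt frase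
instance (frase : String) (out : String) : Decidable (Spec_extraer_palabra_de_frase frase out) := by unfold Spec_extraer_palabra_de_frase; infer_instance

-- ===== CLAIM (what is proved, stated in full; the proofs are below) =====
def Claim_equal_extraer_palabra_de_frase : Prop := ∀ (frase : String), Dom_extraer_palabra_de_frase frase → Spec_extraer_palabra_de_frase frase (extraer_palabra_de_frase frase)

-- ===== LEMMAS AND PROOFS =====
theorem pvAStep_true (ws : List String) (acc : List String) :
    ws.foldl pvAStep (true, acc) = (true, acc ++ ws) := by
  induction ws generalizing acc with
  | nil => simp
  | cons w rest ih =>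
    simp only [List.foldl_cons, pvAStep]
    split_ifs <;> simp [ih]

theorem pvFold_eq (ws : List String) :
    PySem.Str.join " " (ws.foldl pvAStep (false, [])).2 = pvFindTail ws := by
  induction ws with
  | nil => simp [pvFindTail, PySem.Str.join]
  | cons w rest ih =>
    simp only [List.foldl_cons, pvAStep, pvFindTail]
    by_cases h : w = "traducir" ∨ w = "traduce"
    · have hb : (w = "traducir" || w = "traduce") = true := by
        rcases h with h | h <;> simp [h]
      simp [h, hb, pvAStep_true]
    · have hb : (w = "traducir" || w = "traduce") = false := by
        simp only [not_or] at h; simp [h.1, h.2]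
      simp [h, hb, ih]

-- ===== VERDICT (by name: the statement is the Claim_ definition above) =====
theorem extraer_palabra_de_frase_spec : Claim_equal_extraer_palabra_de_frase := by
  intro frase _
  unfold Spec_extraer_palabra_de_frase extraer_palabra_de_frase extraer_palabra_de_frase_alt
  simpa using pvFold_eq ((PySem.Str.split? frase " ").getD [])
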